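-- pv_equiv track=rewrite | github.com/dlxodnd007/coding-test | 프로그래머스/4/118670. 행렬과 연산/행렬과 연산.py | solution
-- ===== SOURCE A (Python) =====
-- from collections import deque
--
-- def solution(rc, operations):
--     left_dq = deque([r[0] for r in rc])
--     right_dq = deque([r[-1] for r in rc])
--     mid_dqs = deque([deque(r[1:-1]) for r in rc])
--
--     for op in operations:
--         if op == 'ShiftRow':
--             left_dq.appendleft(left_dq.pop())
--             right_dq.appendleft(right_dq.pop())
--             mid_dqs.appendleft(mid_dqs.pop())
--         else: # Rotate
--             mid_dqs[0].appendleft(left_dq.popleft())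
--             right_dq.appendleft(mid_dqs[0].pop())
--             mid_dqs[-1].append(right_dq.pop())
--             left_dq.append(mid_dqs[-1].popleft())
--
--     return [[left_dq[i]] + list(mid_dqs[i]) + [right_dq[i]] for i in range(len(rc))]
-- ===== SOURCE B (Python) =====
-- def solution(rc, operations):
--     # Keep the whole grid as a list of rows; apply each operation to it directly.
--     mat = [list(r) for r in rc]
--     for op in operations:
--         if op == 'ShiftRow':
--             mat = mat[-1:] + mat[:-1]
--         else:  # Rotate: border clockwise by one
--             top, mid, bottom = mat[0], mat[1:-1], mat[-1]
--             lefts = [row[0] for row in mid] + [bottom[0]]     # left column below the top row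
--             rights = [top[-1]] + [row[-1] for row in mid]     # right column above the bottom row
--             new_top = [lefts[0]] + top[:-1]
--             new_bottom = bottom[1:] + [rights[-1]]
--             new_mid = [[lf] + row[1:-1] + [rt]
--                        for lf, row, rt in zip(lefts[1:], mid, rights)]
--             mat = [new_top] + new_mid + [new_bottom]
--     return mat
-- ===== Notes on version B (the rewrite author's own statement) =====
-- stated objective: simpler
-- what changed: B keeps the whole matrix as a list of rows and applies each operation to it directly (rotate the row list for ShiftRow; rebuild top/bottom/edge cells for Rotate), instead of A's three boundary deques with O(1) pointer surgery per operation.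
-- outside the precondition, e.g. on solution([[1, 2]], ['Rotate']): A returns [[2, 1]], B returns [[1, 1], [2, 2]]; on solution([[1], [2]], ['ShiftRow']): A returns [[2, 2], [1, 1]], B returns [[2], [1]]
import Mathlib
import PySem

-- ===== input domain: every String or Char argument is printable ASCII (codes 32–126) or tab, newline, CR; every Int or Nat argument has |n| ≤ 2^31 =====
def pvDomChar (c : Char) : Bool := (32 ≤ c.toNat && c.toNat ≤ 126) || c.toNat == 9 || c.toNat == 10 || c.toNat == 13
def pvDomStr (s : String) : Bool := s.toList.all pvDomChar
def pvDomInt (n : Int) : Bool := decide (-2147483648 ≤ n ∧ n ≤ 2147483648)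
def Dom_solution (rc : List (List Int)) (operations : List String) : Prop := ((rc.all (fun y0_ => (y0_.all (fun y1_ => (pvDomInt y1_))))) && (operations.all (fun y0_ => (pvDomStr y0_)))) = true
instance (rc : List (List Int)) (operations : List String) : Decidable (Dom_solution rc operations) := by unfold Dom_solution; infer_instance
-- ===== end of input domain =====

-- B keeps the whole grid as a list of rows and applies each operation to it directly
-- (row rotation / clockwise border rotation), instead of A's three boundary deques: simpler, same results.


-- ===== PORT A =====
-- deques are ported by hand as Lean lists (exact while every pop/popleft hits a nonempty
-- deque, which Pre_solution guarantees): appendleft = cons, append = ++ [·],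
-- pop = getLastD/dropLast, popleft = headD/tail, dq[0]/dq[-1] = headD/getLastD.
def pvStepA (st : List Int × List (List Int) × List Int) (op : String) :
    List Int × List (List Int) × List Int :=
  let (l, m, r) := st
  if op = "ShiftRow" then
    (l.getLastD 0 :: l.dropLast, m.getLastD [] :: m.dropLast, r.getLastD 0 :: r.dropLast)
  else  -- Rotate
    let x := l.headD 0                                  -- left_dq.popleft()
    let l := l.tail
    let m := m.set 0 (x :: m.headD [])                  -- mid_dqs[0].appendleft(x)
    let y := (m.headD []).getLastD 0                    -- mid_dqs[0].pop()
    let m := m.set 0 ((m.headD []).dropLast)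
    let r := y :: r                                     -- right_dq.appendleft(y)
    let z := r.getLastD 0                               -- right_dq.pop()
    let r := r.dropLast
    let m := m.set (m.length - 1) (m.getLastD [] ++ [z])  -- mid_dqs[-1].append(z)
    let w := (m.getLastD []).headD 0                    -- mid_dqs[-1].popleft()
    let m := m.set (m.length - 1) ((m.getLastD []).tail)
    (l ++ [w], m, r)

def solution (rc : List (List Int)) (operations : List String) : List (List Int) :=
  let left := rc.map (fun row => (PySem.List.pyGet? row 0).getD 0)        -- r[0]
  let right := rc.map (fun row => (PySem.List.pyGet? row (-1)).getD 0)    -- r[-1]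
  let mids := rc.map (fun row => PySem.List.slice row (some 1) (some (-1)))  -- r[1:-1]
  let st := operations.foldl pvStepA (left, mids, right)
  (List.range rc.length).map (fun (i : Nat) =>
    [(PySem.List.pyGet? st.1 (i : Int)).getD 0] ++
      (PySem.List.pyGet? st.2.1 (i : Int)).getD [] ++
      [(PySem.List.pyGet? st.2.2 (i : Int)).getD 0])

-- ===== PORT B =====
def pvStepB (mat : List (List Int)) (op : String) : List (List Int) :=
  if op = "ShiftRow" then
    PySem.List.slice mat (some (-1)) none ++ PySem.List.slice mat none (some (-1))
  else  -- Rotate: border clockwise by one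
    let top := (PySem.List.pyGet? mat 0).getD []
    let mid := PySem.List.slice mat (some 1) (some (-1))
    let bottom := (PySem.List.pyGet? mat (-1)).getD []
    let lefts := mid.map (fun row => (PySem.List.pyGet? row 0).getD 0) ++
      [(PySem.List.pyGet? bottom 0).getD 0]
    let rights := (PySem.List.pyGet? top (-1)).getD 0 ::
      mid.map (fun row => (PySem.List.pyGet? row (-1)).getD 0)
    let newTop := (PySem.List.pyGet? lefts 0).getD 0 :: PySem.List.slice top none (some (-1))
    let newBottom := PySem.List.slice bottom (some 1) none ++
      [(PySem.List.pyGet? rights (-1)).getD 0]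
    let newMid := ((PySem.List.slice lefts (some 1) none).zip (mid.zip rights)).map
      (fun p => p.1 :: PySem.List.slice p.2.1 (some 1) (some (-1)) ++ [p.2.2])
    newTop :: newMid ++ [newBottom]

def solution_alt (rc : List (List Int)) (operations : List String) : List (List Int) :=
  -- mat = [list(r) for r in rc]: the defensive copy is the identity on immutable Lean lists
  operations.foldl pvStepB rc

-- ===== PRECONDITION & SPEC =====
-- Pre_ restricts to the problem's natural domain: at least 2 rows and every row of length
-- at least 2 (the Programmers task guarantees both dimensions ≥ 2).  On single-row /
-- single-column inputs A still returns, but its value is an artefact of the three-deque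
-- representation (cells duplicated into width-2 rows, the lone mid deque used as both
-- first and last row); on inputs with an empty row A raises IndexError.
def Pre_solution (rc : List (List Int)) (operations : List String) : Prop :=
  2 ≤ rc.length ∧ ∀ r ∈ rc, 2 ≤ r.length
instance (rc : List (List Int)) (operations : List String) : Decidable (Pre_solution rc operations) := by unfold Pre_solution; infer_instance

def pvWitness_solution : List (List Int) × List String :=
  ([[1, 2], [3, 4]], ["ShiftRow", "Rotate"])

def Spec_solution (rc : List (List Int)) (operations : List String) (out : List (List Int)) : Prop := out = solution_alt rc operations
instance (rc : List (List Int)) (operations : List String) (out : List (List Int)) : Decidable (Spec_solution rc operations out) := by unfold Spec_solution; infer_instance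

-- ===== CLAIM (what is proved, stated in full; the proofs are below) =====
def Claim_equal_solution : Prop := ∀ (rc : List (List Int)) (operations : List String), Dom_solution rc operations → Pre_solution rc operations → Spec_solution rc operations (solution rc operations)

-- ===== LEMMAS AND PROOFS =====

-- abstraction: the three deques A maintains, read off a full matrix
def pvAbs (mat : List (List Int)) : List Int × List (List Int) × List Int :=
  (mat.map (fun r => r.headD 0),
   mat.map (fun r => (r.drop 1).dropLast),
   mat.map (fun r => r.getLastD 0))

-- r[1:-1] in closed form
theorem pvSlice11 {α : Type} (r : List α) :
    PySem.List.slice r (some 1) (some (-1)) = (r.drop 1).dropLast := by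
  cases r with
  | nil => rfl
  | cons a t =>
    simp [PySem.List.slice, PySem.List.clampIdx, List.dropLast_eq_take]
    split <;> omega

theorem pvIdx0 {α : Type} (r : List α) (d : α) :
    (PySem.List.pyGet? r 0).getD d = r.headD d := by
  cases r <;> simp [PySem.List.pyGet?_zero]

theorem pvIdxN1 {α : Type} (r : List α) (d : α) :
    (PySem.List.pyGet? r (-1)).getD d = r.getLastD d := by
  cases r <;> simp [PySem.List.pyGet?_neg_one, List.getLastD_eq_getLast?]

theorem pvDropLastConcatLast {α : Type} (xs : List α) (d : α) (h : xs ≠ []) :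
    xs.dropLast ++ [xs.getLastD d] = xs := by
  induction xs with
  | nil => simp at h
  | cons a t ih => cases t with
    | nil => simp
    | cons b u => simpa using ih (by simp)

theorem pvHeadConsCore {α : Type} (xs : List α) (d : α) (h : 2 ≤ xs.length) :
    xs.headD d :: (xs.drop 1).dropLast = xs.dropLast := by
  match xs, h with
  | a :: b :: t, _ => simp

theorem pvGetLastDCons {α : Type} (xs : List α) (x d : α) (h : xs ≠ []) :
    (x :: xs).getLastD d = xs.getLastD d := by
  cases xs <;> simp_all

theorem pvGetLastDConsConcat {α : Type} (xs : List α) (b : α) : ∀ (y d : α),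
    (y :: (xs ++ [b])).getLastD d = b := by
  induction xs with
  | nil => intro y d; simp
  | cons x t ih => intro y d; simpa [List.getLastD_cons] using ih x y

theorem pvDropLastConsConcat {α : Type} (xs : List α) (b : α) : ∀ (y : α),
    (y :: (xs ++ [b])).dropLast = y :: xs := by
  induction xs with
  | nil => intro y; simp
  | cons x t ih =>
    intro y
    rw [List.dropLast_cons_of_ne_nil (by simp)]
    simpa using ih x

theorem pvHeadDAppend {α : Type} (xs ys : List α) (d : α) (h : xs ≠ []) :
    (xs ++ ys).headD d = xs.headD d := by
  cases xs <;> simp_all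

theorem pvHeadConsTail {α : Type} (xs : List α) (d : α) (h : xs ≠ []) :
    xs.headD d :: xs.tail = xs := by
  cases xs <;> simp_all

-- the three pvAbs components of B's rebuilt middle rows
theorem pvZipMapHead (mid : List (List Int)) (ls rs : List Int)
    (hl : ls.length = mid.length) (hr : rs.length = mid.length + 1) :
    ((ls.zip (mid.zip rs)).map
        (fun p => p.1 :: (p.2.1.drop 1).dropLast ++ [p.2.2])).map (fun r => r.headD 0) = ls := by
  induction mid generalizing ls rs with
  | nil => cases ls <;> simp_all
  | cons m t ih =>
    cases ls with
    | nil => simp at hl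
    | cons a as =>
      cases rs with
      | nil => simp at hr
      | cons b bs => simpa using ih as bs (by simpa using hl) (by simpa using hr)

theorem pvZipMapCore (mid : List (List Int)) (ls rs : List Int)
    (hl : ls.length = mid.length) (hr : rs.length = mid.length + 1) :
    ((ls.zip (mid.zip rs)).map
        (fun p => p.1 :: (p.2.1.drop 1).dropLast ++ [p.2.2])).map
        (fun r => (r.drop 1).dropLast) =
      mid.map (fun r => (r.drop 1).dropLast) := by
  induction mid generalizing ls rs with
  | nil => simp
  | cons m t ih =>
    cases ls with
    | nil => simp at hl
    | cons a as =>
      cases rs with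
      | nil => simp at hr
      | cons b bs =>
        simpa using ih as bs (by simpa using hl) (by simpa using hr)

theorem pvZipMapLast (mid : List (List Int)) (ls rs : List Int)
    (hl : ls.length = mid.length) (hr : rs.length = mid.length + 1) :
    ((ls.zip (mid.zip rs)).map
        (fun p => p.1 :: (p.2.1.drop 1).dropLast ++ [p.2.2])).map (fun r => r.getLastD 0) =
      rs.dropLast := by
  induction mid generalizing ls rs with
  | nil =>
    cases ls with
    | nil =>
      cases rs with
      | nil => simp at hr
      | cons b bs => cases bs <;> simp_all
    | cons a as => simp at hl
  | cons m t ih =>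
    cases ls with
    | nil => simp at hl
    | cons a as =>
      cases rs with
      | nil => simp at hr
      | cons b bs =>
        cases bs with
        | nil => simp at hr
        | cons c cs =>
          simp only [List.zip_cons_cons, List.map_cons]
          rw [show ((b :: c :: cs).dropLast) = b :: (c :: cs).dropLast by simp]
          congr 1
          · simpa using pvGetLastDConsConcat ((m.drop 1).dropLast) b a 0
          · simpa using ih as (c :: cs) (by simpa using hl) (by simpa using hr)

theorem pvGetLastDTail {α : Type} (xs : List α) (d : α) (h : 2 ≤ xs.length) :
    xs.getLastD d = (xs.drop 1).getLastD d := by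
  match xs, h with
  | a :: b :: t, _ => simpa using (pvGetLastDCons (b :: t) a d (by simp))

-- closed form of A's Rotate step on a decomposed state
theorem pvStepARot (op : String) (hop : ¬ op = "ShiftRow") (a a' d d' : Int)
    (c c' : List Int) (as ds : List Int) (cs : List (List Int)) :
    pvStepA (a :: (as ++ [a']), c :: (cs ++ [c']), d :: (ds ++ [d'])) op =
      ((as ++ [a']) ++ [(c' ++ [d']).headD 0],
       (a :: c).dropLast :: (cs ++ [(c' ++ [d']).tail]),
       (a :: c).getLastD 0 :: d :: ds) := by
  simp [pvStepA, hop, pvDropLastConsConcat]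
  simp only [← List.getLastD_eq_getLast?, ← List.headD_eq_head?, pvGetLastDConsConcat]
  constructor
  · cases c' <;> simp
  · trivial

-- closed form of B's Rotate step on a decomposed matrix
theorem pvStepBRot (op : String) (hop : ¬ op = "ShiftRow")
    (t0 b : List Int) (mid : List (List Int)) :
    pvStepB (t0 :: (mid ++ [b])) op =
      ((((mid.map (fun r => r.headD 0)) ++ [b.headD 0]).headD 0) :: t0.dropLast) ::
        ((((mid.map (fun r => r.headD 0) ++ [b.headD 0]).tail).zip
            (mid.zip (t0.getLastD 0 :: mid.map (fun r => r.getLastD 0)))).map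
          (fun p => p.1 :: (p.2.1.drop 1).dropLast ++ [p.2.2]) ++
        [b.tail ++ [(t0.getLastD 0 :: mid.map (fun r => r.getLastD 0)).getLastD 0]]) := by
  simp only [pvStepB, if_neg hop]
  simp [pvSlice11, pvIdx0, pvIdxN1, PySem.List.slice_to_neg_one, PySem.List.slice_from_one]
  have hgl : (t0 :: (mid ++ [b])).getLast?.getD [] = b := by
    simpa [List.getLastD_eq_getLast?] using pvGetLastDConsConcat (α := List Int) mid b t0 []
  rw [hgl]
  refine ⟨?_, rfl, rfl⟩
  cases mid <;> simp

-- one operation: A's deque step tracks B's matrix step through pvAbs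
theorem pvStepComm (mat : List (List Int)) (op : String)
    (hn : 2 ≤ mat.length) (hr : ∀ r ∈ mat, 2 ≤ r.length) :
    pvStepA (pvAbs mat) op = pvAbs (pvStepB mat op) := by
  obtain ⟨t0, rest, rfl⟩ : ∃ t0 rest, mat = t0 :: rest := by
    cases mat with
    | nil => simp at hn
    | cons a l => exact ⟨a, l, rfl⟩
  have hrest : rest ≠ [] := by
    intro h; subst h; simp at hn
  obtain ⟨mid, b, rfl⟩ : ∃ mid b, rest = mid ++ [b] :=
    ⟨rest.dropLast, rest.getLast hrest, (List.dropLast_append_getLast hrest).symm⟩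
  have ht : 2 ≤ t0.length := hr t0 (by simp)
  have hb : 2 ≤ b.length := hr b (by simp)
  have htdl : t0.dropLast ≠ [] := by
    intro h
    have := congrArg List.length h
    simp at this
    omega
  have hbtl : b.tail ≠ [] := by
    intro h
    have := congrArg List.length h
    simp at this
    omega
  by_cases hop : op = "ShiftRow"
  · -- ShiftRow: B rotates the rows down by one
    subst hop
    have hB : pvStepB (t0 :: (mid ++ [b])) "ShiftRow" = b :: t0 :: mid := by
      simp only [pvStepB, PySem.List.slice_from_neg_one,
        PySem.List.slice_to_neg_one]
      have h1 : (t0 :: (mid ++ [b])).length - 1 = (t0 :: mid).length := by simp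
      rw [h1, show (t0 :: (mid ++ [b])) = (t0 :: mid) ++ [b] by simp, List.drop_left,
        List.dropLast_concat]
      simp
    rw [hB]
    simp only [pvAbs, List.map_cons, List.map_append, List.map_nil, pvStepA]
    refine congrArg₂ Prod.mk ?_ (congrArg₂ Prod.mk ?_ ?_) <;>
      rw [pvGetLastDConsConcat, pvDropLastConsConcat]
  · -- Rotate
    rw [pvStepBRot op hop t0 b mid]
    have habs : pvAbs (t0 :: (mid ++ [b])) =
        (t0.headD 0 :: (mid.map (fun r => r.headD 0) ++ [b.headD 0]),
         (t0.drop 1).dropLast ::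
           (mid.map (fun r => (r.drop 1).dropLast) ++ [(b.drop 1).dropLast]),
         t0.getLastD 0 :: (mid.map (fun r => r.getLastD 0) ++ [b.getLastD 0])) := by
      simp [pvAbs]
    rw [habs, pvStepARot op hop]
    simp only [pvAbs, List.map_cons, List.map_append, List.map_nil]
    rw [pvZipMapHead mid _ _ (by simp) (by simp),
      pvZipMapCore mid _ _ (by simp) (by simp),
      pvZipMapLast mid _ _ (by simp) (by simp)]
    have hdrop1 : (b.drop 1).dropLast ++ [b.getLastD 0] = b.drop 1 := by
      rw [pvGetLastDTail b 0 hb]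
      exact pvDropLastConcatLast (b.drop 1) 0 (by simpa [List.drop_one] using hbtl)
    refine congrArg₂ Prod.mk ?_ (congrArg₂ Prod.mk ?_ ?_)
    · -- left column
      rw [hdrop1]
      simp only [List.headD_cons]
      rw [pvHeadDAppend b.tail _ 0 hbtl, List.drop_one, ← List.cons_append,
        pvHeadConsTail _ 0 (by simp)]
    · -- middle cells
      rw [hdrop1, pvHeadConsCore t0 0 ht]
      have h2 : ((b.tail ++ [(t0.getLastD 0 :: mid.map (fun r => r.getLastD 0)).getLastD 0]).drop 1).dropLast
          = b.tail.tail := by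
        rw [List.drop_append_of_le_length (by simp [List.length_tail]; omega),
          List.dropLast_concat]
        cases b <;> simp
      rw [h2]
      simp [List.drop_one]
    · -- right column
      rw [pvHeadConsCore t0 0 ht]
      have h3 : (b.tail ++ [(t0.getLastD 0 :: mid.map (fun r => r.getLastD 0)).getLastD 0]).getLastD 0
          = (t0.getLastD 0 :: mid.map (fun r => r.getLastD 0)).getLastD 0 := by
        simp [List.getLastD_eq_getLast?]
      rw [h3, pvGetLastDCons t0.dropLast _ 0 htdl,
        pvDropLastConcatLast (t0.getLastD 0 :: mid.map (fun r => r.getLastD 0)) 0 (by simp)]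

theorem pvStepShape (mat : List (List Int)) (op : String)
    (hn : 2 ≤ mat.length) (hr : ∀ r ∈ mat, 2 ≤ r.length) :
    (pvStepB mat op).length = mat.length ∧ ∀ r ∈ pvStepB mat op, 2 ≤ r.length := by
  obtain ⟨t0, rest, rfl⟩ : ∃ t0 rest, mat = t0 :: rest := by
    cases mat with
    | nil => simp at hn
    | cons a l => exact ⟨a, l, rfl⟩
  have hrest : rest ≠ [] := by
    intro h; subst h; simp at hn
  obtain ⟨mid, b, rfl⟩ : ∃ mid b, rest = mid ++ [b] :=
    ⟨rest.dropLast, rest.getLast hrest, (List.dropLast_append_getLast hrest).symm⟩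
  have ht : 2 ≤ t0.length := hr t0 (by simp)
  have hb : 2 ≤ b.length := hr b (by simp)
  by_cases hop : op = "ShiftRow"
  · subst hop
    have hB : pvStepB (t0 :: (mid ++ [b])) "ShiftRow" = b :: t0 :: mid := by
      simp only [pvStepB, PySem.List.slice_from_neg_one,
        PySem.List.slice_to_neg_one]
      have h1 : (t0 :: (mid ++ [b])).length - 1 = (t0 :: mid).length := by simp
      rw [h1, show (t0 :: (mid ++ [b])) = (t0 :: mid) ++ [b] by simp, List.drop_left,
        List.dropLast_concat]
      simp
    rw [hB]
    refine ⟨by simp, ?_⟩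
    intro r hrm
    apply hr
    simp at hrm ⊢
    tauto
  · rw [pvStepBRot op hop t0 b mid]
    constructor
    · simp [List.length_zip]
    · intro r hrm
      simp only [List.mem_cons, List.mem_append, List.mem_map] at hrm
      rcases hrm with h | ⟨p, _, rfl⟩ | h
      · subst h
        simp [List.length_dropLast]
        omega
      · simp
      · rcases h with h | h
        · subst h
          simp [List.length_tail]
          omega
        · simp at h

theorem pvFoldComm (ops : List String) (mat : List (List Int))
    (hn : 2 ≤ mat.length) (hr : ∀ r ∈ mat, 2 ≤ r.length) :
    ops.foldl pvStepA (pvAbs mat) = pvAbs (ops.foldl pvStepB mat) ∧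
      (ops.foldl pvStepB mat).length = mat.length ∧
      ∀ r ∈ ops.foldl pvStepB mat, 2 ≤ r.length := by
  induction ops generalizing mat with
  | nil => exact ⟨rfl, rfl, hr⟩
  | cons op t ih =>
    have hs := pvStepShape mat op hn hr
    have hc := pvStepComm mat op hn hr
    have hrec := ih (pvStepB mat op) (by omega) hs.2
    refine ⟨?_, by rw [List.foldl_cons, hrec.2.1, hs.1], ?_⟩
    · rw [List.foldl_cons, hc, List.foldl_cons, hrec.1]
    · intro r hrmem
      exact hrec.2.2 r (by simpa using hrmem)

-- reassembly: A's final comprehension rebuilds exactly the matrix pvAbs was read from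
theorem pvAssemble (mat : List (List Int)) (hr : ∀ r ∈ mat, 2 ≤ r.length) :
    (List.range mat.length).map (fun (i : Nat) =>
      [(PySem.List.pyGet? (pvAbs mat).1 (i : Int)).getD 0] ++
        (PySem.List.pyGet? (pvAbs mat).2.1 (i : Int)).getD [] ++
        [(PySem.List.pyGet? (pvAbs mat).2.2 (i : Int)).getD 0]) = mat := by
  apply List.ext_getElem
  · simp
  · intro i h1 h2
    simp only [pvAbs, List.getElem_map, List.getElem_range, PySem.List.pyGet?_natCast,
      List.getElem?_map]
    rw [List.getElem?_eq_getElem h2]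
    simp only [Option.map_some, Option.getD_some]
    have h := hr (mat[i]) (mat.getElem_mem h2)
    have hne : mat[i] ≠ [] := by
      intro hh
      rw [hh] at h
      simp at h
    have hdne : (mat[i]).drop 1 ≠ [] := by
      intro hh
      have := congrArg List.length hh
      simp at this
      omega
    simp only [List.cons_append, List.nil_append]
    rw [pvGetLastDTail _ 0 h, pvDropLastConcatLast _ 0 hdne, List.drop_one,
      pvHeadConsTail _ 0 hne]

-- ===== VERDICT (by name: the statement is the Claim_ definition above) =====
theorem solution_spec : Claim_equal_solution := by
  intro rc ops _ hpre
  obtain ⟨hn, hrows⟩ := hpre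
  unfold Spec_solution solution solution_alt
  dsimp only
  have hinit : (rc.map (fun row => (PySem.List.pyGet? row 0).getD 0),
      rc.map (fun row => PySem.List.slice row (some 1) (some (-1))),
      rc.map (fun row => (PySem.List.pyGet? row (-1)).getD 0)) = pvAbs rc := by
    unfold pvAbs
    refine congrArg₂ Prod.mk ?_ (congrArg₂ Prod.mk ?_ ?_)
    · simp [pvIdx0]
    · simp [pvSlice11]
    · simp [pvIdxN1]
  rw [hinit]
  have h := pvFoldComm ops rc hn hrows
  rw [h.1, show rc.length = (ops.foldl pvStepB rc).length from h.2.1.symm]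
  exact pvAssemble _ h.2.2
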